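-- pv_equiv track=rewrite | github.com/Mandeep-codes/IVIRS | scripts/generate_simulation_data.py | find_nearest_rsu
-- ===== SOURCE A (Python) =====
-- def find_nearest_rsu(position):
--     """Find nearest RSU to position"""
--     rsu_positions = [0, 2000, 4000, 6000, 8000, 10000]
--     min_dist = float('inf')
--     nearest = 0
--
--     for i, rsu_x in enumerate(rsu_positions):
--         dist = abs(position[0] - rsu_x)
--         if dist < min_dist:
--             min_dist = dist
--             nearest = i
--
--     return nearest
-- ===== SOURCE B (Python) =====
-- def find_nearest_rsu(position):
--     """Find nearest RSU to position"""
--     # RSUs sit on a grid 0,2000,...,10000; the nearest index is a clamped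
--     # closed-form division (half-down rounding keeps the scan's
--     # first-minimum tie-break at exact midpoints).
--     return max(0, min(5, (position[0] + 999) // 2000))
-- ===== Notes on version B (the rewrite author's own statement) =====
-- stated objective: simpler
-- what changed: Replaced the linear scan over the six RSU positions with a closed-form clamped integer division (position[0]+999)//2000 derived from the grid geometry, with half-down rounding matching the loop's first-minimum tie-break.
import Mathlib
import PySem

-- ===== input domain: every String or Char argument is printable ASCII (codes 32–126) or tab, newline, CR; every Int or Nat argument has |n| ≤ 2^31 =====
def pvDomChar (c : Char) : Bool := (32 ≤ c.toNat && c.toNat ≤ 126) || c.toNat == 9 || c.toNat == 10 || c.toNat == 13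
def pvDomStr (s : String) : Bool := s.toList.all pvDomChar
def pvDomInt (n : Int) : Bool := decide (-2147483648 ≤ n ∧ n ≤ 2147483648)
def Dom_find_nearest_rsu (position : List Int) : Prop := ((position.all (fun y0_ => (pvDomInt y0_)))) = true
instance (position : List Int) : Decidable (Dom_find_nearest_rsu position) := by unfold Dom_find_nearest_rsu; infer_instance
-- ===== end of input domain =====

-- B replaces A's linear scan over the six RSU positions by a closed-form clamped
-- integer division derived from the grid geometry (objective: simpler).

-- ===== PORT A =====
-- port of A's loop: state = (min_dist as Option Int, none = float('inf'); nearest)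
def find_nearest_rsu (position : List Int) : Int :=
  let x := (PySem.List.pyGet? position 0).getD 0
  let rsu_positions : List Int := [0, 2000, 4000, 6000, 8000, 10000]
  let st :=
    (PySem.List.enumerate rsu_positions).foldl
      (fun (st : Option Int × Int) p =>
        let dist := |x - p.2|
        match st.1 with
        | none => (some dist, p.1)
        | some m => if dist < m then (some dist, p.1) else st)
      (none, 0)
  st.2

-- ===== PORT B =====
def find_nearest_rsu_alt (position : List Int) : Int :=
  let x := (PySem.List.pyGet? position 0).getD 0
  max 0 (min 5 (PySem.Int.floordiv (x + 999) 2000))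

-- ===== PRECONDITION & SPEC =====
-- Pre_ excludes only the empty list, on which A raises IndexError (position[0]).
def Pre_find_nearest_rsu (position : List Int) : Prop := position ≠ []
instance (position : List Int) : Decidable (Pre_find_nearest_rsu position) := by
  unfold Pre_find_nearest_rsu; infer_instance
def pvWitness_find_nearest_rsu : List Int := [2500]

def Spec_find_nearest_rsu (position : List Int) (out : Int) : Prop := out = find_nearest_rsu_alt position
instance (position : List Int) (out : Int) : Decidable (Spec_find_nearest_rsu position out) := by unfold Spec_find_nearest_rsu; infer_instance

-- ===== CLAIM (what is proved, stated in full; the proofs are below) =====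
def Claim_equal_find_nearest_rsu : Prop := ∀ (position : List Int), Dom_find_nearest_rsu position → Pre_find_nearest_rsu position → Spec_find_nearest_rsu position (find_nearest_rsu position)

-- ===== LEMMAS AND PROOFS =====

-- both sides depend only on x = position[0]; prove the pure-Int fact first
set_option maxHeartbeats 1000000 in
theorem closed_form_eq (x : Int) :
    ((PySem.List.enumerate [(0:Int), 2000, 4000, 6000, 8000, 10000]).foldl
      (fun (st : Option Int × Int) p =>
        let dist := |x - p.2|
        match st.1 with
        | none => (some dist, p.1)
        | some m => if dist < m then (some dist, p.1) else st)
      (none, 0)).2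
    = max 0 (min 5 (PySem.Int.floordiv (x + 999) 2000)) := by
  rw [PySem.Int.floordiv_eq_ediv_of_pos (by omega)]
  simp only [PySem.List.enumerate, List.foldl, Int.abs_eq_natAbs]
  repeat' (first | omega | (split_ifs <;> (try dsimp only)))

-- ===== VERDICT (by name: the statement is the Claim_ definition above) =====
theorem find_nearest_rsu_spec : Claim_equal_find_nearest_rsu := by
  intro position _ hpre
  obtain ⟨x, rest, rfl⟩ : ∃ x rest, position = x :: rest := by
    cases position with
    | nil => exact absurd rfl hpre
    | cons a l => exact ⟨a, l, rfl⟩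
  show find_nearest_rsu (x :: rest) = find_nearest_rsu_alt (x :: rest)
  simp only [find_nearest_rsu, find_nearest_rsu_alt, PySem.List.pyGet?, PySem.List.pyIdx?]
  simpa using closed_form_eq x
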